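-- pv_equiv track=rewrite | github.com/Qwizi/Zelqor | apps/game/consumers.py | _is_region_valid_for_capital
-- ===== SOURCE A (Python) =====
-- def _is_region_valid_for_capital(
--
--     region_id: str,
--     existing_capitals: set[str],
--     neighbor_map: dict,
--     regions: dict,
--     min_distance: int,
-- ) -> bool:
--     if not existing_capitals:
--         return True
--
--     from collections import deque
--
--     visited = {region_id}
--     queue = deque([(region_id, 0)])
--     while queue:
--         current, dist = queue.popleft()
--         if dist > 0 and current in existing_capitals:
--             return False
--         if dist >= min_distance:
--             continue
--         for neighbor in neighbor_map.get(current, []):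
--             if neighbor in regions and neighbor not in visited:
--                 visited.add(neighbor)
--                 queue.append((neighbor, dist + 1))
--     return True
-- ===== SOURCE B (Python) =====
-- def _is_region_valid_for_capital(
--     region_id: str,
--     existing_capitals: set[str],
--     neighbor_map: dict,
--     regions: dict,
--     min_distance: int,
-- ) -> bool:
--     # Search in the OPPOSITE direction: build a reversed adjacency index once,
--     # seed with the capitals, and iterate a reverse-closure of "can reach a
--     # capital in <= k forward steps"; valid iff region_id is never absorbed.
--     if not existing_capitals:
--         return True
--     rev = {}
--     for u, nbrs in neighbor_map.items():
--         for n in nbrs: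
--             if n in regions:
--                 rev.setdefault(n, []).append(u)
--     seen = {c for c in existing_capitals if c in regions and c != region_id}
--     for _ in range(min_distance):
--         grown = set(seen)
--         for n in seen:
--             for u in rev.get(n, []):
--                 if u in regions or u == region_id:
--                     grown.add(u)
--         if len(grown) == len(seen):
--             break
--         seen = grown
--     return region_id not in seen
-- ===== Notes on version B (the rewrite author's own statement) =====
-- stated objective: alternative
-- what changed: Instead of A's forward BFS from region_id with a deque of (node, distance) tags, B builds a reversed adjacency index once, seeds a set with the capitals, and iterates a reverse closure ('can reach a capital in <= k forward steps') up to min_distance rounds with a fixpoint break, finally testing whether region_id was absorbed.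
import Mathlib
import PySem

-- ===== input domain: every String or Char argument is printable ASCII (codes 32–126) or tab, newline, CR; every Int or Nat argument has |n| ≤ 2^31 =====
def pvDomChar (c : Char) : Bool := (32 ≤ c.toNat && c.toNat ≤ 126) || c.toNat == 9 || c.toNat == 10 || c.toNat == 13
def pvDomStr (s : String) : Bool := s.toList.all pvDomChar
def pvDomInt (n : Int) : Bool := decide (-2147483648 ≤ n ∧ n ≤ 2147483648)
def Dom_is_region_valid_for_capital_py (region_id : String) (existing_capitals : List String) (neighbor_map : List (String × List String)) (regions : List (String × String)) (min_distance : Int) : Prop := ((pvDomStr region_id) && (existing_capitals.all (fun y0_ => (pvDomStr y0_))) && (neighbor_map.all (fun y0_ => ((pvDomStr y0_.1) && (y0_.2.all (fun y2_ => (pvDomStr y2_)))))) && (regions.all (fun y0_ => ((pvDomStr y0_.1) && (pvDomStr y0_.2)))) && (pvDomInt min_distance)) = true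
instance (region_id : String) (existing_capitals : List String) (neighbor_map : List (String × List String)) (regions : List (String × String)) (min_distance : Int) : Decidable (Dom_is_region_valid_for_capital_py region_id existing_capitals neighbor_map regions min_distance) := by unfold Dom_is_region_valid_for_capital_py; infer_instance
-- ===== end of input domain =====

-- B searches in the opposite direction: it builds a reversed adjacency index once and
-- iterates a reverse closure seeded from the capitals, instead of A's forward deque BFS
-- from region_id; objective: alternative algorithm, same result.

-- ===== PORT A =====
-- the while-queue loop of A; fuel is a totality guard only (one unit per pop;
-- regions.length + 1 is proved sufficient below, so the fuel-0 branch is never taken)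
def aLoop (caps : List String) (nm : PySem.Dict String (List String)) (regs : PySem.Dict String String) (md : Int) : Nat → List (String × Int) → PySem.Set String → Bool
  | 0, _, _ => true
  | _ + 1, [], _ => true
  | fuel + 1, (current, dist) :: rest, visited =>
    if decide (0 < dist) && PySem.Set.contains caps current then false
    else if md ≤ dist then aLoop caps nm regs md fuel rest visited
    else
      let st := (nm.getD current []).foldl
        (fun (qv : List (String × Int) × PySem.Set String) n =>
          if regs.contains n && !(PySem.Set.contains qv.2 n) then
            (qv.1 ++ [(n, dist + 1)], PySem.Set.add qv.2 n)
          else qv) (rest, visited)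
      aLoop caps nm regs md fuel st.1 st.2

def is_region_valid_for_capital_py (region_id : String) (existing_capitals : List String) (neighbor_map : List (String × List String)) (regions : List (String × String)) (min_distance : Int) : Bool :=
  if existing_capitals.isEmpty then true
  else aLoop existing_capitals (PySem.Dict.mk neighbor_map) (PySem.Dict.mk regions) min_distance
        (regions.length + 1) [(region_id, 0)] (PySem.Set.ofList [region_id])

-- ===== PORT B =====
-- 'for u, nbrs in neighbor_map.items(): for n in nbrs: if n in regions: rev.setdefault(n, []).append(u)'
-- (dict iteration under the first-match convention: first occurrence of each key)
def revBuild (regs : PySem.Dict String String) (nm : PySem.Dict String (List String)) : PySem.Dict String (List String) :=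
  (PySem.List.dedup nm.keys).foldl (fun rev u =>
    (nm.getD u []).foldl (fun rev n =>
      if regs.contains n then rev.insert n (rev.getD n [] ++ [u]) else rev) rev)
    PySem.Dict.empty

-- one round: 'grown = set(seen); for n in seen: for u in rev.get(n, []): if u in regions or u == region_id: grown.add(u)'
def growOnce (rev : PySem.Dict String (List String)) (regs : PySem.Dict String String) (rid : String) (seen : PySem.Set String) : PySem.Set String :=
  seen.foldl (fun grown n =>
    (rev.getD n []).foldl (fun grown u =>
      if regs.contains u || u == rid then PySem.Set.add grown u else grown) grown) seen

-- 'for _ in range(min_distance): … ; if len(grown) == len(seen): break ; seen = grown'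
def bIter (rev : PySem.Dict String (List String)) (regs : PySem.Dict String String) (rid : String) : Nat → PySem.Set String → PySem.Set String
  | 0, seen => seen
  | k + 1, seen =>
    let grown := growOnce rev regs rid seen
    if grown.length = seen.length then seen else bIter rev regs rid k grown

def is_region_valid_for_capital_py_alt (region_id : String) (existing_capitals : List String) (neighbor_map : List (String × List String)) (regions : List (String × String)) (min_distance : Int) : Bool :=
  if existing_capitals.isEmpty then true
  else
    let regsD := PySem.Dict.mk regions
    let rev := revBuild regsD (PySem.Dict.mk neighbor_map)
    let seen0 := PySem.Set.ofList (existing_capitals.filter (fun c => regsD.contains c && !(c == region_id)))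
    let seen := bIter rev regsD region_id min_distance.toNat seen0
    !(PySem.Set.contains seen region_id)

-- ===== PRECONDITION & SPEC =====
def Spec_is_region_valid_for_capital_py (region_id : String) (existing_capitals : List String) (neighbor_map : List (String × List String)) (regions : List (String × String)) (min_distance : Int) (out : Bool) : Prop := out = is_region_valid_for_capital_py_alt region_id existing_capitals neighbor_map regions min_distance
instance (region_id : String) (existing_capitals : List String) (neighbor_map : List (String × List String)) (regions : List (String × String)) (min_distance : Int) (out : Bool) : Decidable (Spec_is_region_valid_for_capital_py region_id existing_capitals neighbor_map regions min_distance out) := by unfold Spec_is_region_valid_for_capital_py; infer_instance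

-- ===== CLAIM (what is proved, stated in full; the proofs are below) =====
def Claim_equal_is_region_valid_for_capital_py : Prop := ∀ (region_id : String) (existing_capitals : List String) (neighbor_map : List (String × List String)) (regions : List (String × String)) (min_distance : Int), Dom_is_region_valid_for_capital_py region_id existing_capitals neighbor_map regions min_distance → Spec_is_region_valid_for_capital_py region_id existing_capitals neighbor_map regions min_distance (is_region_valid_for_capital_py region_id existing_capitals neighbor_map regions min_distance)

-- ===== LEMMAS AND PROOFS =====

-- ---------- forward side: A's deque BFS equals a level-synchronous reach set ----------

-- proof-side helpers describing the forward level-synchronous reach set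
def bStep (regs : PySem.Dict String String) (st : List String × PySem.Set String) (n : String) : List String × PySem.Set String :=
  if regs.contains n && !(PySem.Set.contains st.2 n) then (st.1 ++ [n], PySem.Set.add st.2 n) else st

def bExpand (nm : PySem.Dict String (List String)) (regs : PySem.Dict String String) (fr : List String) (st : List String × PySem.Set String) : List String × PySem.Set String :=
  fr.foldl (fun st cur => (nm.getD cur []).foldl (bStep regs) st) st

def bLoop (nm : PySem.Dict String (List String)) (regs : PySem.Dict String String) (md : Int) (fr : List String) (reach : PySem.Set String) (d : Int) : PySem.Set String :=
  if fr ≠ [] ∧ d < md then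
    let st := bExpand nm regs fr ([], reach)
    bLoop nm regs md st.1 st.2 (d + 1)
  else reach
termination_by (md - d).toNat
decreasing_by omega

-- level-structured view of A's loop: F = unprocessed part of the current level (distance d),
-- G = next level built so far; same fuel discipline as aLoop
def hRun (caps : List String) (nm : PySem.Dict String (List String)) (regs : PySem.Dict String String) (md : Int) : Nat → List String → List String → PySem.Set String → Int → Bool
  | _, [], [], _, _ => true
  | fuel, [], g :: G, v, d => hRun caps nm regs md fuel (g :: G) [] v (d + 1)
  | 0, _ :: _, _, _, _ => true
  | fuel + 1, cur :: F, G, v, d =>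
    if decide (0 < d) && PySem.Set.contains caps cur then false
    else if md ≤ d then hRun caps nm regs md fuel F G v d
    else
      let st := (nm.getD cur []).foldl (bStep regs) (G, v)
      hRun caps nm regs md fuel F st.1 st.2 d
termination_by fuel F G => (fuel, G.length)

-- the reach set still to be computed from a mid-level state (F rest of level d, G next level so far)
def finalSet (nm : PySem.Dict String (List String)) (regs : PySem.Dict String String) (md : Int) (F G : List String) (v : PySem.Set String) (d : Int) : PySem.Set String :=
  if d < md then
    let st := bExpand nm regs F (G, v)
    bLoop nm regs md st.1 st.2 (d + 1)
  else v

-- A's inner neighbor fold equals bStep-fold, with the distance tag mapped on afterwards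
theorem innerA_eq (regs : PySem.Dict String String) (dd : Int) (ns : List String) :
    ∀ (P : List (String × Int)) (G : List String) (v : PySem.Set String),
    ns.foldl (fun (qv : List (String × Int) × PySem.Set String) n =>
      if regs.contains n && !(PySem.Set.contains qv.2 n) then
        (qv.1 ++ [(n, dd)], PySem.Set.add qv.2 n) else qv)
      (P ++ G.map (fun x => (x, dd)), v)
    = (P ++ (ns.foldl (bStep regs) (G, v)).1.map (fun x => (x, dd)),
       (ns.foldl (bStep regs) (G, v)).2) := by
  induction ns with
  | nil => intro P G v; simp
  | cons n ns ih =>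
    intro P G v
    by_cases h : regs.contains n && !(PySem.Set.contains v n)
    · simp only [List.foldl, bStep, h, if_true]
      have : P ++ G.map (fun x => (x, dd)) ++ [(n, dd)]
          = P ++ (G ++ [n]).map (fun x => (x, dd)) := by simp
      rw [this, ih]
    · simp only [List.foldl, bStep, h, if_false]
      exact ih P G v

-- the bStep fold appends the same new elements Δ to both components
theorem foldB_delta (regs : PySem.Dict String String) (ns : List String) :
    ∀ (st : List String × PySem.Set String), ∃ Δ : List String,
      ns.foldl (bStep regs) st = (st.1 ++ Δ, st.2 ++ Δ) ∧
      ∀ x ∈ Δ, regs.contains x = true ∧ x ∉ st.2 := by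
  induction ns with
  | nil => intro st; exact ⟨[], by simp⟩
  | cons n ns ih =>
    intro st
    by_cases h : regs.contains n && !(PySem.Set.contains st.2 n)
    · obtain ⟨hr, hnv⟩ : regs.contains n = true ∧ n ∉ st.2 := by simpa using h
      have hadd : PySem.Set.add st.2 n = st.2 ++ [n] := by
        simp [PySem.Set.add, hnv]
      rcases ih (st.1 ++ [n], st.2 ++ [n]) with ⟨Δ, hΔ, hprop⟩
      refine ⟨n :: Δ, ?_, ?_⟩
      · simp only [List.foldl, bStep, h, if_true, hadd] at *
        simp only [hΔ, List.append_assoc, List.singleton_append]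
      · intro x hx
        rcases List.mem_cons.mp hx with rfl | hx
        · exact ⟨hr, hnv⟩
        · rcases hprop x hx with ⟨h1, h2⟩
          exact ⟨h1, fun hm => h2 (by simp [hm])⟩
    · simp only [List.foldl, bStep, h, if_false]
      exact ih st

-- A's queue always splits into the rest of level d followed by the next level
theorem aLoop_eq_hRun (caps : List String) (nm : PySem.Dict String (List String)) (regs : PySem.Dict String String) (md : Int) :
    ∀ (fuel : Nat) (F G : List String) (v : PySem.Set String) (d : Int),
    aLoop caps nm regs md fuel (F.map (fun x => (x, d)) ++ G.map (fun x => (x, d + 1))) v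
      = hRun caps nm regs md fuel F G v d := by
  intro fuel F G v d
  induction fuel, F, G, v, d using hRun.induct caps nm regs md with
  | case1 fuel v d => cases fuel <;> simp [aLoop, hRun]
  | case2 fuel g G v d ih =>
    rw [hRun]
    have : ([] : List String).map (fun x => (x, d)) ++ (g :: G).map (fun x => (x, d + 1))
        = (g :: G).map (fun x => (x, d + 1)) ++ ([] : List String).map (fun x => (x, d + 1 + 1)) := by
      simp
    rw [this, ih]
  | case3 cur F G v d => simp [aLoop, hRun]
  | case4 fuel cur F G v d hcap =>
    rw [hRun, if_pos hcap]
    simp only [List.map_cons, List.cons_append, aLoop, if_pos hcap]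
  | case5 fuel cur F G v d hcap hskip ih =>
    rw [hRun, if_neg hcap, if_pos hskip]
    simp only [List.map_cons, List.cons_append, aLoop, if_neg hcap, if_pos hskip]
    exact ih
  | case6 fuel cur F G v d hcap hskip st ih =>
    rw [hRun, if_neg hcap, if_neg hskip]
    simp only [List.map_cons, List.cons_append, aLoop, if_neg hcap, if_neg hskip]
    rw [innerA_eq]
    exact ih

-- number of region keys not yet visited
def ufl (U : List String) (v : PySem.Set String) : Nat :=
  (U.filter (fun k => decide (k ∉ v))).length

theorem count_drop (U : List String) (hU : U.Nodup) (v : PySem.Set String) (n : String)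
    (hnU : n ∈ U) (hnv : n ∉ v) : ufl U (v ++ [n]) + 1 = ufl U v := by
  induction U with
  | nil => cases hnU
  | cons x U ih =>
    rcases List.nodup_cons.mp hU with ⟨hx, hU'⟩
    unfold ufl at *
    rw [List.filter_cons, List.filter_cons]
    by_cases hxn : x = n
    · subst hxn
      have h1 : List.filter (fun k => !decide (k ∈ v) && !decide (k = x)) U
          = List.filter (fun k => !decide (k ∈ v)) U := by
        apply List.filter_congr
        intro k hk
        have hkx : k ≠ x := fun h => hx (h ▸ hk)
        simp [hkx]
      have hin : x ∈ v ++ [x] := by simp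
      simp [hin, hnv]
      rw [h1]
    · have hnU' : n ∈ U := by
        rcases List.mem_cons.mp hnU with h | h
        · exact absurd h.symm hxn
        · exact h
      have hxe : (x ∈ v ++ [n]) ↔ (x ∈ v) := by simp [hxn]
      have ihh := ih hU' hnU'
      simp at ihh
      by_cases hxv : x ∈ v
      · simp [hxv, hxe.mpr hxv]; omega
      · have hno : x ∉ v ++ [n] := fun h => hxv (hxe.mp h)
        simp [hxv, hno]; omega

-- fuel accounting through one inner neighbor fold
theorem foldB_fuel (regs : PySem.Dict String String) (U : List String) (hU : U.Nodup)
    (hkeys : ∀ n, regs.contains n = true → n ∈ U) (ns : List String) :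
    ∀ (st : List String × PySem.Set String),
    ufl U (ns.foldl (bStep regs) st).2 + (ns.foldl (bStep regs) st).1.length
      ≤ ufl U st.2 + st.1.length := by
  induction ns with
  | nil => intro st; simp
  | cons n ns ih =>
    intro st
    by_cases h : regs.contains n && !(PySem.Set.contains st.2 n)
    · obtain ⟨hr, hnv⟩ : regs.contains n = true ∧ n ∉ st.2 := by simpa using h
      have hadd : PySem.Set.add st.2 n = st.2 ++ [n] := by simp [PySem.Set.add, hnv]
      have hdrop := count_drop U hU st.2 n (hkeys n hr) hnv
      have := ih (st.1 ++ [n], st.2 ++ [n])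
      simp only [List.foldl, bStep, h, if_true, hadd] at *
      simp at this ⊢
      omega
    · simp only [List.foldl, bStep, h, if_false]
      exact ih st

-- membership monotonicity up to the final reach set
theorem mem_foldB (regs : PySem.Dict String String) (ns : List String) (x : String) :
    ∀ (st : List String × PySem.Set String), x ∈ st.2 → x ∈ (ns.foldl (bStep regs) st).2 := by
  intro st hx
  rcases foldB_delta regs ns st with ⟨Δ, hΔ, _⟩
  simp [hΔ, hx]

theorem mem_bExpand (nm : PySem.Dict String (List String)) (regs : PySem.Dict String String) (x : String) :
    ∀ (fr : List String) (st : List String × PySem.Set String), x ∈ st.2 → x ∈ (bExpand nm regs fr st).2 := by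
  intro fr
  induction fr with
  | nil => intro st hx; exact hx
  | cons cur fr ih =>
    intro st hx
    exact ih _ (mem_foldB regs _ x st hx)

theorem mem_bLoop (nm : PySem.Dict String (List String)) (regs : PySem.Dict String String) (md : Int) (x : String) :
    ∀ (fr : List String) (reach : PySem.Set String) (d : Int), x ∈ reach → x ∈ bLoop nm regs md fr reach d := by
  intro fr reach d
  induction fr, reach, d using bLoop.induct nm regs md with
  | case1 fr reach d h st ih =>
    intro hx
    rw [bLoop, if_pos h]
    exact ih (mem_bExpand nm regs x fr ([], reach) hx)
  | case2 fr reach d h =>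
    intro hx
    rw [bLoop, if_neg h]
    exact hx

theorem mem_finalSet (nm : PySem.Dict String (List String)) (regs : PySem.Dict String String) (md : Int)
    (F G : List String) (v : PySem.Set String) (d : Int) (x : String) (hx : x ∈ v) :
    x ∈ finalSet nm regs md F G v d := by
  unfold finalSet
  split
  · exact mem_bLoop nm regs md x _ _ _ (mem_bExpand nm regs x F (G, v) hx)
  · exact hx

-- finalSet facts
theorem finalSet_skip (nm : PySem.Dict String (List String)) (regs : PySem.Dict String String) (md : Int)
    (F F' G : List String) (v : PySem.Set String) (d : Int) (h : md ≤ d) :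
    finalSet nm regs md F G v d = v := by
  unfold finalSet; rw [if_neg (by omega)]

theorem finalSet_cons (nm : PySem.Dict String (List String)) (regs : PySem.Dict String String) (md : Int)
    (cur : String) (F G : List String) (v : PySem.Set String) (d : Int) (h : d < md) :
    finalSet nm regs md (cur :: F) G v d
      = finalSet nm regs md F ((nm.getD cur []).foldl (bStep regs) (G, v)).1
          ((nm.getD cur []).foldl (bStep regs) (G, v)).2 d := by
  unfold finalSet
  rw [if_pos h, if_pos h]
  rfl

theorem finalSet_shift (nm : PySem.Dict String (List String)) (regs : PySem.Dict String String) (md : Int)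
    (g : String) (G : List String) (v : PySem.Set String) (d : Int) :
    finalSet nm regs md [] (g :: G) v d = finalSet nm regs md (g :: G) [] v (d + 1) := by
  unfold finalSet
  by_cases h : d < md
  · rw [if_pos h]
    have hexp : bExpand nm regs [] (g :: G, v) = (g :: G, v) := rfl
    rw [hexp, bLoop]
    by_cases h2 : d + 1 < md
    · rw [if_pos (by exact ⟨by simp, h2⟩), if_pos h2]
    · rw [if_neg (by intro hh; exact h2 hh.2), if_neg h2]
  · rw [if_neg h, if_neg (by omega)]

theorem finalSet_nil (nm : PySem.Dict String (List String)) (regs : PySem.Dict String String) (md : Int)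
    (v : PySem.Set String) (d : Int) : finalSet nm regs md [] [] v d = v := by
  unfold finalSet
  by_cases h : d < md
  · rw [if_pos h]
    have hexp : bExpand nm regs [] (([] : List String), v) = ([], v) := rfl
    rw [hexp, bLoop, if_neg (by simp)]
  · rw [if_neg h]

theorem finalSet_eq_bLoop (nm : PySem.Dict String (List String)) (regs : PySem.Dict String String) (md : Int)
    (F : List String) (v : PySem.Set String) (d : Int) :
    finalSet nm regs md F [] v d = bLoop nm regs md F v d := by
  unfold finalSet
  by_cases h : d < md
  · rw [if_pos h]
    cases F with
    | nil =>
      have hexp : bExpand nm regs [] (([] : List String), v) = ([], v) := rfl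
      rw [hexp, bLoop, if_neg (by simp), bLoop, if_neg (by simp)]
    | cons f F =>
      conv_rhs => rw [bLoop]
      rw [if_pos ⟨by simp, h⟩]
  · rw [if_neg h]
    conv_rhs => rw [bLoop]
    rw [if_neg (by intro hh; exact h hh.2)]

theorem finalSet_nil_left (nm : PySem.Dict String (List String)) (regs : PySem.Dict String String) (md : Int)
    (F : List String) (v : PySem.Set String) (d : Int) :
    finalSet nm regs md [] F v d = bLoop nm regs md F v (d + 1) := by
  cases F with
  | nil =>
    rw [finalSet_nil, bLoop, if_neg (by simp)]
  | cons g G =>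
    rw [finalSet_shift, finalSet_eq_bLoop]

-- main forward invariant: from any mid-level state of A's loop, the remaining run returns
-- true iff no capital other than region_id lies in the reach set still to be computed
theorem gmain (caps : List String) (nm : PySem.Dict String (List String)) (regs : PySem.Dict String String)
    (md : Int) (rid : String) (U : List String) (hU : U.Nodup)
    (hkeys : ∀ n, regs.contains n = true → n ∈ U) :
    ∀ (fuel : Nat) (F G : List String) (v : PySem.Set String) (d : Int),
    0 ≤ d → (F = [] ∨ 1 ≤ d) →
    ufl U v + F.length + G.length ≤ fuel →
    rid ∈ v →
    (∀ x ∈ F ++ G, x ∈ v ∧ x ≠ rid) →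
    (∀ x ∈ v, x = rid ∨ x ∈ F ++ G ∨ x ∉ caps) →
    hRun caps nm regs md fuel F G v d
      = caps.all (fun c => c == rid || !(PySem.Set.contains (finalSet nm regs md F G v d) c)) := by
  intro fuel F G v d
  induction fuel, F, G, v, d using hRun.induct caps nm regs md with
  | case1 fuel v d =>
    intro _ _ _ _ _ h5
    rw [hRun, finalSet_nil]
    symm
    rw [List.all_eq_true]
    intro c hc
    by_cases hcr : c = rid
    · simp [hcr]
    · have hcv : c ∉ v := fun hv => by
        rcases h5 c hv with h | h | h
        · exact hcr h
        · simp at h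
        · exact h hc
      simp [hcr, hcv]
  | case2 fuel g G v d ih =>
    intro h0 h1 h2 h3 h4 h5
    rw [hRun, finalSet_shift]
    apply ih (by omega) (by omega)
    · simpa using h2
    · exact h3
    · intro x hx; exact h4 x (by simpa using hx)
    · intro x hx
      rcases h5 x hx with h | h | h
      · exact Or.inl h
      · exact Or.inr (Or.inl (by simpa using h))
      · exact Or.inr (Or.inr h)
  | case3 cur F G v d =>
    intro _ _ h2 _ _ _
    simp only [List.length_cons] at h2
    omega
  | case4 fuel cur F G v d hcap =>
    intro _ _ _ _ h4 _
    rw [hRun, if_pos hcap]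
    obtain ⟨hvc, hnr⟩ := h4 cur (by simp)
    have hcc : cur ∈ caps := by
      rcases Bool.and_eq_true_iff.mp hcap with ⟨_, h⟩
      simpa using h
    symm
    rw [List.all_eq_false]
    refine ⟨cur, hcc, ?_⟩
    have hmem := mem_finalSet nm regs md (cur :: F) G v d cur hvc
    simp [hnr, hmem]
  | case5 fuel cur F G v d hcap hskip ih =>
    intro h0 h1 h2 h3 h4 h5
    have hd1 : 1 ≤ d := by
      rcases h1 with h1 | h1
      · simp at h1
      · exact h1
    have hncap : cur ∉ caps := by
      simp [show (0:Int) < d by omega] at hcap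
      exact hcap
    rw [hRun, if_neg (by exact fun h => by rw [h] at hcap; exact hcap rfl), if_pos hskip,
        finalSet_skip nm regs md (cur :: F) F G v d hskip]
    rw [ih h0 (Or.inr hd1) (by simp at h2 ⊢; omega) h3
        (fun x hx => h4 x (List.mem_cons_of_mem cur hx))
        ?_]
    · rw [finalSet_skip nm regs md F F G v d hskip]
    · intro x hx
      rcases h5 x hx with h | h | h
      · exact Or.inl h
      · rcases List.mem_append.mp h with h | h
        · rcases List.mem_cons.mp h with rfl | h
          · exact Or.inr (Or.inr hncap)
          · exact Or.inr (Or.inl (List.mem_append.mpr (Or.inl h)))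
        · exact Or.inr (Or.inl (List.mem_append.mpr (Or.inr h)))
      · exact Or.inr (Or.inr h)
  | case6 fuel cur F G v d hcap hskip st ih =>
    intro h0 h1 h2 h3 h4 h5
    have hd1 : 1 ≤ d := by
      rcases h1 with h1 | h1
      · simp at h1
      · exact h1
    have hncap : cur ∉ caps := by
      simp [show (0:Int) < d by omega] at hcap
      exact hcap
    have hdm : d < md := by omega
    obtain ⟨Δ, hΔ, hΔp⟩ := foldB_delta regs (nm.getD cur []) (G, v)
    have hst : st = (G ++ Δ, v ++ Δ) := hΔ
    have hst1 : st.1 = G ++ Δ := by rw [hst]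
    have hst2 : st.2 = v ++ Δ := by rw [hst]
    have hfuel : ufl U st.2 + st.1.length ≤ ufl U v + G.length :=
      foldB_fuel regs U hU hkeys (nm.getD cur []) (G, v)
    rw [hRun, if_neg (by exact fun h => by rw [h] at hcap; exact hcap rfl), if_neg hskip,
        finalSet_cons nm regs md cur F G v d hdm]
    apply ih h0 (Or.inr hd1)
    · simp only [List.length_cons] at h2
      omega
    · rw [hst2]; exact List.mem_append.mpr (Or.inl h3)
    · intro x hx
      rcases List.mem_append.mp hx with hx | hx
      · obtain ⟨ha, hb⟩ := h4 x (by simp [hx])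
        exact ⟨by rw [hst2]; exact List.mem_append.mpr (Or.inl ha), hb⟩
      · rw [hst1] at hx
        rcases List.mem_append.mp hx with hx | hx
        · obtain ⟨ha, hb⟩ := h4 x (by simp [hx])
          exact ⟨by rw [hst2]; exact List.mem_append.mpr (Or.inl ha), hb⟩
        · obtain ⟨_, hnv⟩ := hΔp x hx
          refine ⟨by rw [hst2]; exact List.mem_append.mpr (Or.inr hx), ?_⟩
          intro hh; rw [hh] at hnv; exact hnv h3
    · intro x hx
      rw [hst2] at hx
      rcases List.mem_append.mp hx with hx | hx
      · rcases h5 x hx with h | h | h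
        · exact Or.inl h
        · rcases List.mem_append.mp h with h | h
          · rcases List.mem_cons.mp h with rfl | h
            · exact Or.inr (Or.inr hncap)
            · exact Or.inr (Or.inl (List.mem_append.mpr (Or.inl h)))
          · refine Or.inr (Or.inl (List.mem_append.mpr (Or.inr ?_)))
            rw [hst1]; exact List.mem_append.mpr (Or.inl h)
        · exact Or.inr (Or.inr h)
      · refine Or.inr (Or.inl (List.mem_append.mpr (Or.inr ?_)))
        rw [hst1]; exact List.mem_append.mpr (Or.inr hx)

-- A equals the capital check over the forward level-synchronous reach set
theorem A_eq_fwd (rid : String) (caps : List String) (nmL : List (String × List String)) (regsL : List (String × String)) (md : Int) :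
    is_region_valid_for_capital_py rid caps nmL regsL md
      = if caps.isEmpty then true
        else caps.all (fun c => c == rid ||
          !(PySem.Set.contains (bLoop (PySem.Dict.mk nmL) (PySem.Dict.mk regsL) md [rid] (PySem.Set.ofList [rid]) 0) c)) := by
  unfold is_region_valid_for_capital_py
  cases caps with
  | nil => simp
  | cons c0 cs =>
    rw [if_neg (by simp), if_neg (by simp)]
    rw [show PySem.Set.ofList [rid] = [rid] from rfl]
    have hq : [(rid, (0:Int))]
        = ([rid].map (fun x => (x, (0:Int))) ++ ([] : List String).map (fun x => (x, (0:Int) + 1))) := by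
      simp
    rw [hq, aLoop_eq_hRun]
    rw [hRun, if_neg (by simp)]
    by_cases hmd : md ≤ (0:Int)
    · rw [if_pos hmd, hRun]
      have hreach : bLoop (PySem.Dict.mk nmL) (PySem.Dict.mk regsL) md [rid] [rid] 0 = [rid] := by
        rw [bLoop, if_neg (by rintro ⟨-, h⟩; omega)]
      rw [hreach]
      symm
      rw [List.all_eq_true]
      intro c hc
      by_cases hcr : c = rid <;> simp [hcr]
    · rw [if_neg hmd]
      set st := ((PySem.Dict.mk nmL).getD rid []).foldl (bStep (PySem.Dict.mk regsL)) (([] : List String), [rid]) with hstdef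
      obtain ⟨Δ, hΔ, hΔp⟩ := foldB_delta (PySem.Dict.mk regsL) ((PySem.Dict.mk nmL).getD rid []) (([] : List String), [rid])
      have hst : st = (Δ, [rid] ++ Δ) := by rw [hstdef, hΔ]; rfl
      have hst1 : st.1 = Δ := by rw [hst]
      have hst2 : st.2 = [rid] ++ Δ := by rw [hst]
      have hU : (PySem.List.dedup (regsL.map Prod.fst)).Nodup := PySem.List.nodup_dedup _
      have hkeys : ∀ n, (PySem.Dict.mk regsL).contains n = true → n ∈ PySem.List.dedup (regsL.map Prod.fst) := by
        intro n h
        rw [PySem.List.mem_dedup]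
        rw [PySem.Dict.contains_mk] at h
        rcases List.any_eq_true.mp h with ⟨p, hp, hpe⟩
        have : p.1 = n := by simpa using hpe
        exact this ▸ List.mem_map_of_mem hp
      have hUlen : (PySem.List.dedup (regsL.map Prod.fst)).length ≤ regsL.length := by
        rw [PySem.List.dedup_eq_ofList]
        calc (PySem.Set.ofList (regsL.map Prod.fst)).length
            ≤ (regsL.map Prod.fst).length := PySem.Set.length_ofList_le _
          _ = regsL.length := List.length_map ..
      have hfuel0 : ufl (PySem.List.dedup (regsL.map Prod.fst)) st.2 + st.1.length
          ≤ ufl (PySem.List.dedup (regsL.map Prod.fst)) [rid] + 0 :=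
        foldB_fuel (PySem.Dict.mk regsL) _ hU hkeys _ _
      have hufl : ufl (PySem.List.dedup (regsL.map Prod.fst)) [rid]
          ≤ (PySem.List.dedup (regsL.map Prod.fst)).length := List.length_filter_le _ _
      rw [gmain (c0 :: cs) (PySem.Dict.mk nmL) (PySem.Dict.mk regsL) md rid
            (PySem.List.dedup (regsL.map Prod.fst)) hU hkeys regsL.length [] st.1 st.2 0
            le_rfl (Or.inl rfl) (by simp only [List.length_nil]; omega)
            (by rw [hst2]; simp)
            (by
              intro x hx
              simp only [List.nil_append] at hx
              rw [hst1] at hx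
              obtain ⟨-, hnv⟩ := hΔp x hx
              refine ⟨by rw [hst2]; exact List.mem_append.mpr (Or.inr hx), fun hh => ?_⟩
              exact hnv (by simp [hh])
            )
            (by
              intro x hx
              rw [hst2] at hx
              rcases List.mem_append.mp hx with hx | hx
              · exact Or.inl (by simpa using hx)
              · exact Or.inr (Or.inl (by rw [List.nil_append, hst1]; exact hx))
            )]
      rw [finalSet_nil_left]
      have hbl : bLoop (PySem.Dict.mk nmL) (PySem.Dict.mk regsL) md [rid] [rid] 0
          = bLoop (PySem.Dict.mk nmL) (PySem.Dict.mk regsL) md st.1 st.2 (0 + 1) := by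
        rw [bLoop, if_pos ⟨by simp, by omega⟩]
        rfl
      rw [hbl]

-- ---------- forward reach predicate ----------

def Rp (nm : PySem.Dict String (List String)) (regs : PySem.Dict String String) (rid : String) : Nat → String → Prop
  | 0 => fun x => x = rid
  | k + 1 => fun x => Rp nm regs rid k x ∨ (regs.contains x = true ∧ ∃ f, Rp nm regs rid k f ∧ x ∈ nm.getD f [])

theorem Rp_regs (nm : PySem.Dict String (List String)) (regs : PySem.Dict String String) (rid : String) :
    ∀ (k : Nat) (x : String), Rp nm regs rid k x → x = rid ∨ regs.contains x = true := by
  intro k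
  induction k with
  | zero => intro x h; exact Or.inl h
  | succ k ih =>
    intro x h
    rcases h with h | ⟨hr, _⟩
    · exact ih x h
    · exact Or.inr hr

theorem Rp_stab (nm : PySem.Dict String (List String)) (regs : PySem.Dict String String) (rid : String)
    (j : Nat) (hstab : ∀ x, Rp nm regs rid (j + 1) x → Rp nm regs rid j x) :
    ∀ (m : Nat) (x : String), Rp nm regs rid (j + m) x → Rp nm regs rid j x := by
  intro m
  induction m with
  | zero => intro x h; exact h
  | succ m ih =>
    intro x h
    rcases h with h | ⟨hr, f, hf, he⟩
    · exact ih x h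
    · exact hstab x (Or.inr ⟨hr, f, ih f hf, he⟩)

theorem Rp_mono_le (nm : PySem.Dict String (List String)) (regs : PySem.Dict String String) (rid : String)
    (j k : Nat) (hjk : j ≤ k) (x : String) (h : Rp nm regs rid j x) : Rp nm regs rid k x := by
  obtain ⟨m, rfl⟩ := Nat.exists_eq_add_of_le hjk
  clear hjk
  induction m with
  | zero => exact h
  | succ m ih => exact Or.inl ih

-- x is first forward-reached at level j
def NewAt (nm : PySem.Dict String (List String)) (regs : PySem.Dict String String) (rid : String) : Nat → String → Prop
  | 0 => fun x => x = rid
  | j + 1 => fun x => Rp nm regs rid (j + 1) x ∧ ¬ Rp nm regs rid j x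

theorem NewAt_sub (nm : PySem.Dict String (List String)) (regs : PySem.Dict String String) (rid : String)
    (j : Nat) (x : String) (h : NewAt nm regs rid j x) : Rp nm regs rid j x := by
  cases j with
  | zero => exact h
  | succ j => exact h.1

theorem Rp_succ_iff (nm : PySem.Dict String (List String)) (regs : PySem.Dict String String) (rid : String)
    (j : Nat) (x : String) :
    Rp nm regs rid (j + 1) x ↔ Rp nm regs rid j x ∨ NewAt nm regs rid (j + 1) x := by
  constructor
  · intro h
    by_cases hj : Rp nm regs rid j x
    · exact Or.inl hj
    · exact Or.inr ⟨h, hj⟩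
  · rintro (h | h)
    · exact Or.inl h
    · exact h.1

-- strengthened delta characterization of the inner fold
theorem foldB_mem_iff (regs : PySem.Dict String String) (ns : List String) :
    ∀ (st : List String × PySem.Set String), ∃ Δ : List String,
      ns.foldl (bStep regs) st = (st.1 ++ Δ, st.2 ++ Δ) ∧
      ∀ x, x ∈ Δ ↔ regs.contains x = true ∧ x ∉ st.2 ∧ x ∈ ns := by
  induction ns with
  | nil => intro st; exact ⟨[], by simp⟩
  | cons n ns ih =>
    intro st
    by_cases h : regs.contains n && !(PySem.Set.contains st.2 n)
    · obtain ⟨hr, hnv⟩ : regs.contains n = true ∧ n ∉ st.2 := by simpa using h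
      have hadd : PySem.Set.add st.2 n = st.2 ++ [n] := by simp [PySem.Set.add, hnv]
      rcases ih (st.1 ++ [n], st.2 ++ [n]) with ⟨Δ, hΔ, hchar⟩
      refine ⟨n :: Δ, ?_, ?_⟩
      · simp only [List.foldl, bStep, h, if_true, hadd] at *
        simp only [hΔ, List.append_assoc, List.singleton_append]
      · intro x
        simp only [List.mem_cons]
        constructor
        · rintro (rfl | hx)
          · exact ⟨hr, hnv, Or.inl rfl⟩
          · rcases (hchar x).mp hx with ⟨h1, h2, h3⟩
            exact ⟨h1, fun hm => h2 (by simp [hm]), Or.inr h3⟩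
        · rintro ⟨h1, h2, (rfl | h3)⟩
          · exact Or.inl rfl
          · by_cases hxn : x = n
            · exact Or.inl hxn
            · exact Or.inr ((hchar x).mpr ⟨h1, by simp [h2, hxn], h3⟩)
    · rcases ih st with ⟨Δ, hΔ, hchar⟩
      refine ⟨Δ, ?_, ?_⟩
      · simp only [List.foldl, bStep, h, if_false]
        exact hΔ
      · intro x
        rw [hchar x]
        constructor
        · rintro ⟨h1, h2, h3⟩
          exact ⟨h1, h2, List.mem_cons_of_mem _ h3⟩
        · rintro ⟨h1, h2, h3⟩
          rcases List.mem_cons.mp h3 with rfl | h3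
          · exact absurd (by simp [h1, h2]) h
          · exact ⟨h1, h2, h3⟩

theorem bExpand_mem (nm : PySem.Dict String (List String)) (regs : PySem.Dict String String) (fr : List String) :
    ∀ (st : List String × PySem.Set String), ∃ Δ : List String,
      bExpand nm regs fr st = (st.1 ++ Δ, st.2 ++ Δ) ∧
      ∀ x, x ∈ Δ ↔ regs.contains x = true ∧ x ∉ st.2 ∧ ∃ f ∈ fr, x ∈ nm.getD f [] := by
  induction fr with
  | nil => intro st; exact ⟨[], by simp [bExpand]⟩
  | cons f fr ih =>
    intro st
    rcases foldB_mem_iff regs (nm.getD f []) st with ⟨Δ1, h1, c1⟩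
    rcases ih ((nm.getD f []).foldl (bStep regs) st) with ⟨Δ2, h2, c2⟩
    rw [h1] at c2
    have c2' : ∀ x, x ∈ Δ2 ↔ regs.contains x = true ∧ x ∉ st.2 ++ Δ1 ∧ ∃ f ∈ fr, x ∈ nm.getD f [] :=
      fun x => c2 x
    refine ⟨Δ1 ++ Δ2, ?_, ?_⟩
    · show bExpand nm regs fr ((nm.getD f []).foldl (bStep regs) st) = _
      rw [h2, h1]
      simp [List.append_assoc]
    · intro x
      simp only [List.mem_append]
      constructor
      · rintro (hx | hx)
        · rcases (c1 x).mp hx with ⟨a1, a2, a3⟩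
          exact ⟨a1, a2, f, List.mem_cons_self .., a3⟩
        · rcases (c2' x).mp hx with ⟨a1, a2, f', a3, a4⟩
          exact ⟨a1, fun hm => a2 (by simp [hm]), f', List.mem_cons_of_mem _ a3, a4⟩
      · rintro ⟨a1, a2, f', hf', a4⟩
        rcases List.mem_cons.mp hf' with rfl | hf'
        · exact Or.inl ((c1 x).mpr ⟨a1, a2, a4⟩)
        · by_cases hx1 : x ∈ Δ1
          · exact Or.inl hx1
          · exact Or.inr ((c2' x).mpr ⟨a1, by simp [a2, hx1], f', hf', a4⟩)

-- one level step: the freshly added elements are exactly the nodes new at level j+1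
theorem newAt_step (nm : PySem.Dict String (List String)) (regs : PySem.Dict String String) (rid : String)
    (j : Nat) (fr v : PySem.Set String)
    (hv : ∀ x, x ∈ v ↔ Rp nm regs rid j x) (hf : ∀ x, x ∈ fr ↔ NewAt nm regs rid j x) (x : String) :
    (regs.contains x = true ∧ x ∉ v ∧ ∃ f ∈ fr, x ∈ nm.getD f []) ↔ NewAt nm regs rid (j + 1) x := by
  constructor
  · rintro ⟨hr, hnv, f, hff, he⟩
    have hrf : Rp nm regs rid j f := NewAt_sub nm regs rid j f ((hf f).mp hff)
    exact ⟨Or.inr ⟨hr, f, hrf, he⟩, fun hj => hnv ((hv x).mpr hj)⟩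
  · rintro ⟨hr1, hnr⟩
    rcases hr1 with h | ⟨hrx, f, hrf, he⟩
    · exact absurd h hnr
    · refine ⟨hrx, fun hm => hnr ((hv x).mp hm), f, ?_, he⟩
      rw [hf f]
      cases j with
      | zero => exact hrf
      | succ m =>
        refine ⟨hrf, fun hm => ?_⟩
        exact hnr (Or.inr ⟨hrx, f, hm, he⟩)

-- main invariant of the level-synchronous loop
theorem bLoop_mem_inv (nm : PySem.Dict String (List String)) (regs : PySem.Dict String String)
    (rid : String) (md : Int) :
    ∀ (n j : Nat) (fr v : PySem.Set String),
    (j : Int) ≤ md → md.toNat ≤ j + n →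
    (∀ x, x ∈ v ↔ Rp nm regs rid j x) → (∀ x, x ∈ fr ↔ NewAt nm regs rid j x) →
    ∀ x, x ∈ bLoop nm regs md fr v (j : Int) ↔ Rp nm regs rid md.toNat x := by
  intro n
  induction n with
  | zero =>
    intro j fr v hj hn hv _ x
    have hje : j = md.toNat := by omega
    rw [bLoop, if_neg (by rintro ⟨-, h⟩; omega)]
    rw [hv x, hje]
  | succ n ih =>
    intro j fr v hj hn hv hf x
    rw [bLoop]
    by_cases hcond : fr ≠ [] ∧ (j : Int) < md
    · rw [if_pos hcond]
      rcases bExpand_mem nm regs fr ([], v) with ⟨Δ, hΔ, hchar⟩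
      have hst1 : (bExpand nm regs fr ([], v)).1 = Δ := by rw [hΔ]; simp
      have hst2 : (bExpand nm regs fr ([], v)).2 = v ++ Δ := by rw [hΔ]
      have hΔnew : ∀ y, y ∈ Δ ↔ NewAt nm regs rid (j + 1) y := by
        intro y
        rw [hchar y]
        exact newAt_step nm regs rid j fr v hv hf y
      have hv' : ∀ y, y ∈ v ++ Δ ↔ Rp nm regs rid (j + 1) y := by
        intro y
        rw [List.mem_append, hv y, hΔnew y, Rp_succ_iff]
      have hcast : ((j : Int) + 1) = ((j + 1 : Nat) : Int) := by push_cast; ring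
      show x ∈ bLoop nm regs md (bExpand nm regs fr ([], v)).1 (bExpand nm regs fr ([], v)).2 ((j : Int) + 1) ↔ _
      rw [hst1, hst2, hcast]
      exact ih (j + 1) Δ (v ++ Δ) (by omega) (by omega) hv' hΔnew x
    · rw [if_neg hcond]
      rcases Decidable.not_and_iff_not_or_not.mp hcond with hfr | hlt
      · have hfr' : fr = [] := by
          by_contra hc; exact hfr hc
        subst hfr'
        cases j with
        | zero => exact absurd ((hf rid).mpr rfl) List.not_mem_nil
        | succ m =>
          have hst : ∀ y, Rp nm regs rid (m + 1) y → Rp nm regs rid m y := by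
            intro y hy
            by_contra hc
            exact absurd ((hf y).mpr ⟨hy, hc⟩) List.not_mem_nil
          rw [hv x]
          constructor
          · intro h
            exact Rp_mono_le nm regs rid (m + 1) md.toNat (by omega) x h
          · intro h
            have hd : md.toNat = m + (md.toNat - m) := by omega
            rw [hd] at h
            exact Or.inl (Rp_stab nm regs rid m hst (md.toNat - m) x h)
      · have hje : j = md.toNat := by omega
        rw [hv x, hje]

-- the forward reach set computed by bLoop is exactly Rp md.toNat
theorem fwd_mem (nm : PySem.Dict String (List String)) (regs : PySem.Dict String String) (rid : String)
    (md : Int) (x : String) :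
    x ∈ bLoop nm regs md [rid] (PySem.Set.ofList [rid]) 0 ↔ Rp nm regs rid md.toNat x := by
  rw [show PySem.Set.ofList [rid] = [rid] from rfl]
  by_cases h0 : 0 ≤ md
  · rw [show (0 : Int) = ((0 : Nat) : Int) from rfl]
    exact bLoop_mem_inv nm regs rid md md.toNat 0 [rid] [rid]
      (by omega) (by omega)
      (fun y => List.mem_singleton)
      (fun y => List.mem_singleton)
      x
  · have ht : md.toNat = 0 := by omega
    rw [bLoop, if_neg (by rintro ⟨-, h⟩; omega), ht]
    exact List.mem_singleton

-- ---------- reverse side: B's closure iteration ----------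

-- characterization of the reversed adjacency index
theorem revInner_mem (regs : PySem.Dict String String) (u : String) (ns : List String) :
    ∀ (rev : PySem.Dict String (List String)) (n x : String),
    x ∈ (ns.foldl (fun rev n =>
          if regs.contains n then rev.insert n (rev.getD n [] ++ [u]) else rev) rev).getD n []
      ↔ x ∈ rev.getD n [] ∨ (regs.contains n = true ∧ n ∈ ns ∧ x = u) := by
  induction ns with
  | nil => intro rev n x; simp
  | cons n0 ns ih =>
    intro rev n x
    by_cases hr : regs.contains n0 = true
    · simp only [List.foldl, hr, if_true]
      rw [ih]
      by_cases hn : n = n0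
      · subst hn
        rw [PySem.Dict.getD_insert_self]
        simp only [List.mem_append, List.mem_cons]
        constructor
        · rintro ((h | (h | h)) | ⟨h1, h2, h3⟩)
          · exact Or.inl h
          · exact Or.inr ⟨hr, Or.inl trivial, h⟩
          · cases h
          · exact Or.inr ⟨h1, Or.inr h2, h3⟩
        · rintro (h | ⟨h1, (h2 | h2), h3⟩)
          · exact Or.inl (Or.inl h)
          · subst h3; exact Or.inl (Or.inr (Or.inl rfl))
          · exact Or.inr ⟨h1, h2, h3⟩
      · have he : (rev.insert n0 (rev.getD n0 [] ++ [u])).getD n [] = rev.getD n [] := by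
          rw [PySem.Dict.getD_insert_of_ne]; exact hn
        rw [he]
        simp only [List.mem_cons]
        constructor
        · rintro (h | ⟨h1, h2, h3⟩)
          · exact Or.inl h
          · exact Or.inr ⟨h1, Or.inr h2, h3⟩
        · rintro (h | ⟨h1, (h2 | h2), h3⟩)
          · exact Or.inl h
          · exact absurd h2 hn
          · exact Or.inr ⟨h1, h2, h3⟩
    · simp only [List.foldl, hr, if_false, Bool.false_eq_true]
      rw [ih]
      constructor
      · rintro (h | ⟨h1, h2, h3⟩)
        · exact Or.inl h
        · exact Or.inr ⟨h1, List.mem_cons_of_mem _ h2, h3⟩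
      · rintro (h | ⟨h1, h2, h3⟩)
        · exact Or.inl h
        · rcases List.mem_cons.mp h2 with rfl | h2
          · exact absurd h1 hr
          · exact Or.inr ⟨h1, h2, h3⟩

theorem revOuter_mem (regs : PySem.Dict String String) (nm : PySem.Dict String (List String))
    (K : List String) :
    ∀ (rev : PySem.Dict String (List String)) (n x : String),
    x ∈ (K.foldl (fun rev u =>
          (nm.getD u []).foldl (fun rev n =>
            if regs.contains n then rev.insert n (rev.getD n [] ++ [u]) else rev) rev) rev).getD n []
      ↔ x ∈ rev.getD n [] ∨ (regs.contains n = true ∧ x ∈ K ∧ n ∈ nm.getD x []) := by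
  induction K with
  | nil => intro rev n x; simp
  | cons u K ih =>
    intro rev n x
    simp only [List.foldl]
    rw [ih, revInner_mem]
    constructor
    · rintro ((h | ⟨h1, h2, h3⟩) | ⟨h1, h2, h3⟩)
      · exact Or.inl h
      · subst h3; exact Or.inr ⟨h1, List.mem_cons_self .., h2⟩
      · exact Or.inr ⟨h1, List.mem_cons_of_mem _ h2, h3⟩
    · rintro (h | ⟨h1, h2, h3⟩)
      · exact Or.inl (Or.inl h)
      · rcases List.mem_cons.mp h2 with rfl | h2
        · exact Or.inl (Or.inr ⟨h1, h3, rfl⟩)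
        · exact Or.inr ⟨h1, h2, h3⟩

theorem revBuild_mem (regs : PySem.Dict String String) (nm : PySem.Dict String (List String))
    (n x : String) :
    x ∈ (revBuild regs nm).getD n [] ↔ regs.contains n = true ∧ n ∈ nm.getD x [] := by
  unfold revBuild
  rw [revOuter_mem]
  constructor
  · rintro (h | ⟨h1, _, h3⟩)
    · simp [PySem.Dict.getD_empty] at h
    · exact ⟨h1, h3⟩
  · rintro ⟨h1, h3⟩
    have hc : nm.contains x = true := by
      by_contra hc
      rw [PySem.Dict.getD_of_not_contains (h := by simpa using hc) ..] at h3
      exact absurd h3 List.not_mem_nil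
    refine Or.inr ⟨h1, ?_, h3⟩
    rw [PySem.List.mem_dedup]
    exact (PySem.Dict.contains_iff_mem_keys ..).mp hc

-- one closure round, as a set
theorem growInner_mem (regs : PySem.Dict String String) (rid : String) (us : List String) :
    ∀ (g : PySem.Set String) (x : String),
    x ∈ us.foldl (fun g u => if regs.contains u || u == rid then PySem.Set.add g u else g) g
      ↔ x ∈ g ∨ ((regs.contains x = true ∨ x = rid) ∧ x ∈ us) := by
  induction us with
  | nil => intro g x; simp
  | cons u us ih =>
    intro g x
    by_cases h : (regs.contains u || u == rid) = true
    · simp only [List.foldl, h, if_true]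
      rw [ih]
      simp only [PySem.Set.mem_add, List.mem_cons]
      constructor
      · rintro ((hg | rfl) | ⟨hc, hu⟩)
        · exact Or.inl hg
        · refine Or.inr ⟨?_, Or.inl rfl⟩
          rcases Bool.or_eq_true_iff.mp h with h | h
          · exact Or.inl h
          · exact Or.inr (by simpa using h)
        · exact Or.inr ⟨hc, Or.inr hu⟩
      · rintro (hg | ⟨hc, (rfl | hu)⟩)
        · exact Or.inl (Or.inl hg)
        · exact Or.inl (Or.inr rfl)
        · exact Or.inr ⟨hc, hu⟩
    · simp only [List.foldl, h, if_false, Bool.false_eq_true]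
      rw [ih]
      constructor
      · rintro (hg | ⟨hc, hu⟩)
        · exact Or.inl hg
        · exact Or.inr ⟨hc, List.mem_cons_of_mem _ hu⟩
      · rintro (hg | ⟨hc, hu⟩)
        · exact Or.inl hg
        · rcases List.mem_cons.mp hu with rfl | hu
          · exfalso
            apply h
            rcases hc with hc | rfl
            · simp [hc]
            · simp
          · exact Or.inr ⟨hc, hu⟩

theorem growOnce_mem (rev : PySem.Dict String (List String)) (regs : PySem.Dict String String)
    (rid : String) (S : PySem.Set String) (x : String) :
    x ∈ growOnce rev regs rid S ↔ x ∈ S ∨ ((regs.contains x = true ∨ x = rid) ∧ ∃ n ∈ S, x ∈ rev.getD n []) := by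
  unfold growOnce
  have main : ∀ (L : List String) (g : PySem.Set String),
      x ∈ L.foldl (fun grown n =>
          (rev.getD n []).foldl (fun grown u =>
            if regs.contains u || u == rid then PySem.Set.add grown u else grown) grown) g
        ↔ x ∈ g ∨ ((regs.contains x = true ∨ x = rid) ∧ ∃ n ∈ L, x ∈ rev.getD n []) := by
    intro L
    induction L with
    | nil => intro g; simp
    | cons n L ih =>
      intro g
      simp only [List.foldl]
      rw [ih, growInner_mem]
      constructor
      · rintro ((hg | ⟨hc, hu⟩) | ⟨hc, m, hm, hx⟩)
        · exact Or.inl hg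
        · exact Or.inr ⟨hc, n, List.mem_cons_self .., hu⟩
        · exact Or.inr ⟨hc, m, List.mem_cons_of_mem _ hm, hx⟩
      · rintro (hg | ⟨hc, m, hm, hx⟩)
        · exact Or.inl (Or.inl hg)
        · rcases List.mem_cons.mp hm with rfl | hm
          · exact Or.inl (Or.inr ⟨hc, hx⟩)
          · exact Or.inr ⟨hc, m, hm, hx⟩
  exact main S S

theorem growOnce_append (rev : PySem.Dict String (List String)) (regs : PySem.Dict String String)
    (rid : String) (S : PySem.Set String) :
    ∃ Δ, growOnce rev regs rid S = S ++ Δ := by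
  unfold growOnce
  have inner : ∀ (us : List String) (g : PySem.Set String),
      ∃ Δ, us.foldl (fun g u => if regs.contains u || u == rid then PySem.Set.add g u else g) g = g ++ Δ := by
    intro us
    induction us with
    | nil => intro g; exact ⟨[], by simp⟩
    | cons u us ih =>
      intro g
      simp only [List.foldl]
      by_cases h : (regs.contains u || u == rid) = true
      · rw [if_pos h]
        by_cases hg : u ∈ g
        · have he : PySem.Set.add g u = g := by simp [PySem.Set.add, hg]
          rw [he]; exact ih g
        · have he : PySem.Set.add g u = g ++ [u] := by simp [PySem.Set.add, hg]
          rcases ih (g ++ [u]) with ⟨Δ, hΔ⟩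
          exact ⟨u :: Δ, by rw [he, hΔ]; simp⟩
      · rw [if_neg h]; exact ih g
  have main : ∀ (L : List String) (g : PySem.Set String),
      ∃ Δ, L.foldl (fun grown n =>
          (rev.getD n []).foldl (fun grown u =>
            if regs.contains u || u == rid then PySem.Set.add grown u else grown) grown) g = g ++ Δ := by
    intro L
    induction L with
    | nil => intro g; exact ⟨[], by simp⟩
    | cons n L ih =>
      intro g
      simp only [List.foldl]
      rcases inner (rev.getD n []) g with ⟨Δ1, h1⟩
      rcases ih (g ++ Δ1) with ⟨Δ2, h2⟩
      exact ⟨Δ1 ++ Δ2, by rw [h1, h2, List.append_assoc]⟩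
  exact main S S

-- plain iteration of growOnce, and B's loop (with its break) computes it
def growIter (rev : PySem.Dict String (List String)) (regs : PySem.Dict String String) (rid : String) : Nat → PySem.Set String → PySem.Set String
  | 0, S => S
  | k + 1, S => growOnce rev regs rid (growIter rev regs rid k S)

theorem growIter_fix (rev : PySem.Dict String (List String)) (regs : PySem.Dict String String)
    (rid : String) (S : PySem.Set String) (hfix : growOnce rev regs rid S = S) :
    ∀ (k : Nat), growIter rev regs rid k S = S := by
  intro k
  induction k with
  | zero => rfl
  | succ k ih => rw [growIter, ih, hfix]

theorem growIter_comm (rev : PySem.Dict String (List String)) (regs : PySem.Dict String String)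
    (rid : String) : ∀ (k : Nat) (S : PySem.Set String),
    growIter rev regs rid k (growOnce rev regs rid S) = growOnce rev regs rid (growIter rev regs rid k S) := by
  intro k
  induction k with
  | zero => intro S; rfl
  | succ k ih => intro S; rw [growIter, ih, growIter]

theorem bIter_eq_growIter (rev : PySem.Dict String (List String)) (regs : PySem.Dict String String)
    (rid : String) : ∀ (k : Nat) (S : PySem.Set String), bIter rev regs rid k S = growIter rev regs rid k S := by
  intro k
  induction k with
  | zero => intro S; rfl
  | succ k ih =>
    intro S
    rw [bIter]
    rcases growOnce_append rev regs rid S with ⟨Δ, hΔ⟩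
    by_cases hlen : (growOnce rev regs rid S).length = S.length
    · rw [if_pos hlen]
      have hnil : Δ = [] := by
        have := congrArg List.length hΔ
        rw [List.length_append] at this
        have : Δ.length = 0 := by omega
        exact List.length_eq_zero_iff.mp this
      have hfix : growOnce rev regs rid S = S := by rw [hΔ, hnil, List.append_nil]
      rw [growIter, growIter_fix rev regs rid S hfix, hfix]
    · rw [if_neg hlen, ih, growIter_comm, growIter]

-- ---------- bridge: reverse closure reaches rid iff forward reach hits a capital ----------

def Wp (nm : PySem.Dict String (List String)) (regs : PySem.Dict String String) (S0 : List String) : Nat → String → Prop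
  | 0 => fun x => x ∈ S0
  | k + 1 => fun x => Wp nm regs S0 k x ∨ ∃ y, y ∈ nm.getD x [] ∧ regs.contains y = true ∧ Wp nm regs S0 k y

theorem Wp_mono (nm : PySem.Dict String (List String)) (regs : PySem.Dict String String) (S0 : List String)
    (k : Nat) (x : String) (h : Wp nm regs S0 k x) : Wp nm regs S0 (k + 1) x := Or.inl h

-- RevP k x ↔ Wp k x ∧ (x valid), where RevP is the membership of growIter
theorem revP_iff_W (nm : PySem.Dict String (List String)) (regs : PySem.Dict String String)
    (rid : String) (S0 : List String)
    (hS0 : ∀ c ∈ S0, regs.contains c = true) :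
    ∀ (k : Nat) (x : String),
      x ∈ growIter (revBuild regs nm) regs rid k S0 ↔
        Wp nm regs S0 k x ∧ (regs.contains x = true ∨ x = rid) := by
  intro k
  induction k with
  | zero =>
    intro x
    constructor
    · intro hx; exact ⟨hx, Or.inl (hS0 x hx)⟩
    · rintro ⟨hx, _⟩; exact hx
  | succ k ih =>
    intro x
    rw [growIter, growOnce_mem]
    constructor
    · rintro (hx | ⟨hc, n, hn, hrev⟩)
      · rcases (ih x).mp hx with ⟨hw, hcx⟩
        exact ⟨Or.inl hw, hcx⟩
      · rcases (ih n).mp hn with ⟨hwn, _⟩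
        rcases (revBuild_mem regs nm n x).mp hrev with ⟨hrn, hedge⟩
        exact ⟨Or.inr ⟨n, hedge, hrn, hwn⟩, hc⟩
    · rintro ⟨(hw | ⟨y, hedge, hry, hwy⟩), hcx⟩
      · exact Or.inl ((ih x).mpr ⟨hw, hcx⟩)
      · refine Or.inr ⟨hcx, y, ?_, ?_⟩
        · exact (ih y).mpr ⟨hwy, Or.inl hry⟩
        · exact (revBuild_mem regs nm y x).mpr ⟨hry, hedge⟩

theorem dirA (nm : PySem.Dict String (List String)) (regs : PySem.Dict String String)
    (rid : String) (S0 : List String) :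
    ∀ (j i : Nat) (x : String), Rp nm regs rid i x → Wp nm regs S0 j x →
      ∃ c, c ∈ S0 ∧ Rp nm regs rid (i + j) c := by
  intro j
  induction j with
  | zero => intro i x hr hw; exact ⟨x, hw, hr⟩
  | succ j ih =>
    intro i x hr hw
    rcases hw with hw | ⟨y, he, hy, hwy⟩
    · rcases ih i x hr hw with ⟨c, hc, hrc⟩
      exact ⟨c, hc, Or.inl hrc⟩
    · have hry : Rp nm regs rid (i + 1) y := Or.inr ⟨hy, x, hr, he⟩
      rcases ih (i + 1) y hry hwy with ⟨c, hc, hrc⟩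
      refine ⟨c, hc, ?_⟩
      have : i + 1 + j = i + (j + 1) := by omega
      rwa [this] at hrc

theorem dirB (nm : PySem.Dict String (List String)) (regs : PySem.Dict String String)
    (rid : String) (S0 : List String) :
    ∀ (i : Nat) (x : String) (j : Nat), Rp nm regs rid i x → Wp nm regs S0 j x →
      Wp nm regs S0 (i + j) rid := by
  intro i
  induction i with
  | zero => intro x j hr hw; rw [Rp] at hr; subst hr; simpa using hw
  | succ i ih =>
    intro x j hr hw
    rcases hr with hr | ⟨hrx, f, hf, he⟩
    · have := ih x j hr hw
      have h2 : i + j + 1 = i + 1 + j := by omega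
      exact h2 ▸ Wp_mono nm regs S0 (i + j) rid this
    · have hwf : Wp nm regs S0 (j + 1) f := Or.inr ⟨x, he, hrx, hw⟩
      have := ih f (j + 1) hf hwf
      have h2 : i + (j + 1) = i + 1 + j := by omega
      rwa [h2] at this

-- membership form of PySem.Set.contains, used repeatedly below
theorem set_contains_iff (s : PySem.Set String) (x : String) :
    PySem.Set.contains s x = true ↔ x ∈ s := by
  simp [PySem.Set.contains]

-- ===== VERDICT (by name: the statement is the Claim_ definition above) =====
theorem is_region_valid_for_capital_py_spec : Claim_equal_is_region_valid_for_capital_py := by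
  intro rid caps nmL regsL md _dom
  unfold Spec_is_region_valid_for_capital_py is_region_valid_for_capital_py_alt
  rw [A_eq_fwd]
  cases caps with
  | nil => rfl
  | cons c0 cs =>
    rw [if_neg (by simp), if_neg (by simp)]
    show (c0 :: cs).all (fun c => c == rid ||
        !(PySem.Set.contains (bLoop (PySem.Dict.mk nmL) (PySem.Dict.mk regsL) md [rid] (PySem.Set.ofList [rid]) 0) c))
      = !(PySem.Set.contains (bIter (revBuild (PySem.Dict.mk regsL) (PySem.Dict.mk nmL)) (PySem.Dict.mk regsL) rid md.toNat
            (PySem.Set.ofList ((c0 :: cs).filter (fun c => (PySem.Dict.mk regsL).contains c && !(c == rid))))) rid)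
    rw [bIter_eq_growIter]
    set nmD := PySem.Dict.mk nmL with hnm
    set regsD := PySem.Dict.mk regsL with hregs
    set S0 := PySem.Set.ofList ((c0 :: cs).filter (fun c => regsD.contains c && !(c == rid))) with hS0def
    have hS0mem : ∀ c, c ∈ S0 ↔ c ∈ (c0 :: cs) ∧ regsD.contains c = true ∧ c ≠ rid := by
      intro c
      rw [hS0def, PySem.Set.mem_ofList, List.mem_filter]
      simp only [Bool.and_eq_true, Bool.not_eq_true', beq_eq_false_iff_ne, ne_eq]
    have hS0regs : ∀ c ∈ S0, regsD.contains c = true := fun c hc => ((hS0mem c).mp hc).2.1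
    have hkey : PySem.Set.contains (growIter (revBuild regsD nmD) regsD rid md.toNat S0) rid = true
        ↔ ∃ c ∈ (c0 :: cs), c ≠ rid ∧ Rp nmD regsD rid md.toNat c := by
      rw [set_contains_iff]
      rw [revP_iff_W nmD regsD rid S0 hS0regs md.toNat rid]
      constructor
      · rintro ⟨hw, -⟩
        rcases dirA nmD regsD rid S0 md.toNat 0 rid rfl hw with ⟨c, hc, hrc⟩
        rcases (hS0mem c).mp hc with ⟨hc1, -, hc3⟩
        rw [Nat.zero_add] at hrc
        exact ⟨c, hc1, hc3, hrc⟩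
      · rintro ⟨c, hc1, hc2, hc3⟩
        have hreg : regsD.contains c = true := by
          rcases Rp_regs nmD regsD rid md.toNat c hc3 with h | h
          · exact absurd h hc2
          · exact h
        have hw0 : Wp nmD regsD S0 0 c := (hS0mem c).mpr ⟨hc1, hreg, hc2⟩
        have hw := dirB nmD regsD rid S0 md.toNat c 0 hc3 hw0
        rw [Nat.add_zero] at hw
        exact ⟨hw, Or.inr rfl⟩
    by_cases hrev : PySem.Set.contains (growIter (revBuild regsD nmD) regsD rid md.toNat S0) rid = true
    · rw [hrev]
      rcases hkey.mp hrev with ⟨c, hc1, hc2, hc3⟩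
      have hcf : PySem.Set.contains (bLoop nmD regsD md [rid] (PySem.Set.ofList [rid]) 0) c = true := by
        rw [set_contains_iff, fwd_mem]
        exact hc3
      rw [Bool.not_true, List.all_eq_false]
      refine ⟨c, hc1, ?_⟩
      rw [hcf]
      simp [hc2]
    · rw [Bool.not_eq_true] at hrev
      rw [hrev, Bool.not_false, List.all_eq_true]
      intro c hc
      by_cases hcr : c = rid
      · simp [hcr]
      · have hcf : PySem.Set.contains (bLoop nmD regsD md [rid] (PySem.Set.ofList [rid]) 0) c = false := by
          rw [Bool.eq_false_iff]
          intro hct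
          rw [set_contains_iff, fwd_mem] at hct
          have := hkey.mpr ⟨c, hc, hcr, hct⟩
          rw [hrev] at this
          exact Bool.false_ne_true this
        rw [hcf]
        simp
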